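-- pv_equiv track=rewrite | github.com/olivierjuanedf/planning-the-european-electric-system-europe2 | long_term_uc/utils/basic_utils.py | are_lists_eq
-- ===== SOURCE A (Python) =====
-- from typing import List, Optional, Tuple, Union
--
-- def are_lists_eq(list_of_lists: List[list]) -> bool:
--     first_list = list_of_lists[0]
--     len_first_list = len(first_list)
--     set_first_list = set(first_list)
--     n_lists = len(list_of_lists)
--     for i_list in range(1, n_lists):
--         current_list = list_of_lists[i_list]
--         if (len(current_list) == len_first_list and set(current_list) == set_first_list) is False:
--             return False
--     return True
-- ===== SOURCE B (Python) =====
-- def are_lists_eq(list_of_lists):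
--     signatures = {(len(l), tuple(sorted(set(l)))) for l in list_of_lists}
--     return len(signatures) <= 1
-- ===== Notes on version B (the rewrite author's own statement) =====
-- stated objective: alternative
-- what changed: Replaces the early-returning index loop comparing each list against the first list's length and set with mapping every list to a canonical signature (length, sorted distinct elements) and testing that at most one distinct signature exists.
import Mathlib
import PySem

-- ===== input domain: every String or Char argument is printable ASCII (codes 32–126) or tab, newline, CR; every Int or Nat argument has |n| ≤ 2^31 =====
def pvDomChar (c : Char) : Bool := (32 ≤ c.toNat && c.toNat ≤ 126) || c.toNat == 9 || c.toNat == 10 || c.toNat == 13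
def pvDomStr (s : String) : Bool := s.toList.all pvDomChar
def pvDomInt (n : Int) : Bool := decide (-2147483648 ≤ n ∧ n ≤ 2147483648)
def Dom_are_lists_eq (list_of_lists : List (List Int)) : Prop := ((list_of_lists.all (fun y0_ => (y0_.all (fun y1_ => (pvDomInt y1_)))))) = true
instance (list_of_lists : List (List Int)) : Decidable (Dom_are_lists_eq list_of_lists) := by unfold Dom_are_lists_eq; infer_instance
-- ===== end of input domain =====

-- B maps each inner list to a canonical signature (length, sorted distinct elements) and
-- tests that at most one distinct signature exists, instead of A's early-returning index
-- loop against the first list; same cost class, alternative decomposition.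

-- ===== PORT A =====
def are_lists_eq (list_of_lists : List (List Int)) : Bool :=
  match list_of_lists with
  | [] => false  -- list_of_lists[0] raises IndexError here; excluded by Pre_
  | first_list :: _ =>
    let len_first_list : Int := first_list.length
    let set_first_list : PySem.Set Int := PySem.Set.ofList first_list
    (PySem.List.pyRange 1 (list_of_lists.length : Int) 1).all (fun i_list =>
      let current_list := PySem.List.pyGetD list_of_lists i_list []
      decide ((current_list.length : Int) = len_first_list) &&
        PySem.Set.equal (PySem.Set.ofList current_list) set_first_list)

-- ===== PORT B =====
def sigOf (l : List Int) : Int × List Int :=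
  ((l.length : Int), PySem.List.sorted (PySem.Set.ofList l) (fun x => x) false)

def are_lists_eq_alt (list_of_lists : List (List Int)) : Bool :=
  let signatures : PySem.Set (Int × List Int) :=
    PySem.Set.ofList (list_of_lists.map sigOf)
  decide ((signatures.length : Int) ≤ 1)

-- ===== PRECONDITION & SPEC =====
-- A raises IndexError on the empty outer list; Pre_ excludes exactly that input.
def Pre_are_lists_eq (list_of_lists : List (List Int)) : Prop := list_of_lists ≠ []
instance (list_of_lists : List (List Int)) : Decidable (Pre_are_lists_eq list_of_lists) := by unfold Pre_are_lists_eq; infer_instance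
def pvWitness_are_lists_eq : List (List Int) := [[1, 2], [2, 1, 2]]

def Spec_are_lists_eq (list_of_lists : List (List Int)) (out : Bool) : Prop := out = are_lists_eq_alt list_of_lists
instance (list_of_lists : List (List Int)) (out : Bool) : Decidable (Spec_are_lists_eq list_of_lists out) := by unfold Spec_are_lists_eq; infer_instance

-- ===== CLAIM (what is proved, stated in full; the proofs are below) =====
def Claim_equal_are_lists_eq : Prop := ∀ (list_of_lists : List (List Int)), Dom_are_lists_eq list_of_lists → Pre_are_lists_eq list_of_lists → Spec_are_lists_eq list_of_lists (are_lists_eq list_of_lists)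

-- ===== LEMMAS AND PROOFS =====

-- Python set equality of set(a) and set(b) is equality of their sorted distinct elements.
lemma equal_iff_sorted_eq (a b : List Int) :
    PySem.Set.equal (PySem.Set.ofList a) (PySem.Set.ofList b) = true ↔
      PySem.List.sorted (PySem.Set.ofList a) (fun x => x) false
        = PySem.List.sorted (PySem.Set.ofList b) (fun x => x) false := by
  rw [PySem.Set.equal_iff, PySem.List.sorted_id_eq_sorted_id_iff_perm]
  exact (List.perm_ext_iff_of_nodup (PySem.Set.nodup_ofList a) (PySem.Set.nodup_ofList b)).symm

-- set(x :: xs) has at most one element iff every element of xs equals x.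
lemma ofList_cons_length_le_one {α : Type} [BEq α] [LawfulBEq α] (x : α) (xs : List α) :
    (PySem.Set.ofList (x :: xs)).length ≤ 1 ↔ ∀ y ∈ xs, y = x := by
  rw [PySem.Set.ofList_cons]
  simp only [List.length_cons]
  rw [show (List.length ((PySem.Set.ofList xs).discard x) + 1 ≤ 1) ↔
      ((PySem.Set.ofList xs).discard x) = [] from by
    rw [← List.length_eq_zero_iff]; omega]
  rw [List.eq_nil_iff_forall_not_mem]
  constructor
  · intro h y hy
    by_contra hne
    exact h y (by rw [PySem.Set.mem_discard, PySem.Set.mem_ofList]; exact ⟨hy, hne⟩)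
  · intro h y hy
    rw [PySem.Set.mem_discard, PySem.Set.mem_ofList] at hy
    exact hy.2 (h y hy.1)

lemma key_lemma (first : List Int) (rest : List (List Int)) :
    are_lists_eq (first :: rest) = are_lists_eq_alt (first :: rest) := by
  rw [Bool.eq_iff_iff]
  unfold are_lists_eq are_lists_eq_alt
  simp only [List.map_cons]
  rw [decide_eq_true_iff]
  have hlen : ((first :: rest).length : Int) = (1 : Int) + rest.length := by
    simp; omega
  rw [hlen]
  have hmap := PySem.List.map_pyGetD_pyRange (a := 1) (xs := first :: rest) (d := ([] : List Int)) (by norm_num)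
  simp only [PySem.List.len_eq] at hmap
  have hall : ∀ (g : List Int → Bool),
      (PySem.List.pyRange 1 (1 + (rest.length : Int)) 1).all
        (fun i => g (PySem.List.pyGetD (first :: rest) i [])) = rest.all g := by
    intro g
    rw [show (PySem.List.pyRange 1 (1 + (rest.length : Int)) 1).all
        (fun i => g (PySem.List.pyGetD (first :: rest) i []))
        = ((PySem.List.pyRange 1 (1 + (rest.length : Int)) 1).map
            (fun i => PySem.List.pyGetD (first :: rest) i [])).all g from (List.all_map).symm]
    have : ((first :: rest).length : Int) = 1 + (rest.length : Int) := by simp; omega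
    rw [← this, hmap]
    simp
  rw [hall (fun current_list => decide ((current_list.length : Int) = (first.length : Int)) &&
      PySem.Set.equal (PySem.Set.ofList current_list) (PySem.Set.ofList first))]
  rw [show ((PySem.Set.ofList (sigOf first :: rest.map sigOf)).length : Int) ≤ 1
      ↔ (PySem.Set.ofList (sigOf first :: rest.map sigOf)).length ≤ 1 by exact_mod_cast Iff.rfl]
  rw [ofList_cons_length_le_one]
  rw [List.all_eq_true]
  constructor
  · intro h y hy
    rw [List.mem_map] at hy
    obtain ⟨l, hl, rfl⟩ := hy
    have := h l hl
    simp only [Bool.and_eq_true, decide_eq_true_iff] at this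
    unfold sigOf
    rw [(equal_iff_sorted_eq l first).mp this.2, this.1]
  · intro h l hl
    have := h (sigOf l) (List.mem_map.mpr ⟨l, hl, rfl⟩)
    unfold sigOf at this
    rw [Prod.mk.injEq] at this
    simp only [Bool.and_eq_true, decide_eq_true_iff]
    exact ⟨this.1, (equal_iff_sorted_eq l first).mpr this.2⟩

-- ===== VERDICT (by name: the statement is the Claim_ definition above) =====
theorem are_lists_eq_spec : Claim_equal_are_lists_eq := by
  intro lol _ hpre
  unfold Spec_are_lists_eq
  match lol with
  | [] => exact absurd rfl hpre
  | first :: rest => exact key_lemma first rest
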